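-- pv_equiv track=rewrite | github.com/CongGroup/Poisoning-SSL-based-RS | Seq-poison/generate_data.py | unpadding
-- ===== SOURCE A (Python) =====
-- def unpadding(fake_seq, start_id, target_item):
--     #tensor to list
--     fake_seqs = []
--     id = start_id
--     for fake_data in fake_seq:
--         seq = []
--         seq.append(id)
--         for i, f in enumerate(fake_data):
--             if f != 0:
--                 seq.append(f)
--             else:
--                 # clip when there are two consecutive "0"
--                 if i == (len(fake_data) - 1) or fake_data[i+1] == 0:
--                     break
--                 else:
--                     continue
--         if len(seq) == 1 or len(seq) == 2 or target_item not in seq: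
--             continue
--         fake_seqs.append(seq)
--         id += 1
--
--     return fake_seqs
-- ===== SOURCE B (Python) =====
-- def unpadding(fake_seq, start_id, target_item):
--     # Tokenizer approach: split each row on zeros into chunks, then take chunks
--     # while nonempty (an empty chunk marks a double/trailing zero) and concatenate.
--     result = []
--     next_id = start_id
--     for row in fake_seq:
--         chunks = [[]]
--         for x in row:
--             if x == 0:
--                 chunks.append([])
--             else:
--                 chunks[-1].append(x)
--         content = list(chunks[0])
--         for c in chunks[1:]:
--             if not c:
--                 break
--             content += c
--         if len(content) >= 2 and (target_item == next_id or target_item in content):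
--             result.append([next_id] + content)
--             next_id += 1
--     return result
-- ===== Notes on version B (the rewrite author's own statement) =====
-- stated objective: alternative
-- what changed: A's interleaved index-based inner loop (append nonzeros, break on double/trailing zero via i+1 lookahead) is replaced by a tokenizer: each row is split on zeros into chunks and the chunks are concatenated while nonempty, with the acceptance test rewritten in positive form over the chunk content and the id.
import Mathlib
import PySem

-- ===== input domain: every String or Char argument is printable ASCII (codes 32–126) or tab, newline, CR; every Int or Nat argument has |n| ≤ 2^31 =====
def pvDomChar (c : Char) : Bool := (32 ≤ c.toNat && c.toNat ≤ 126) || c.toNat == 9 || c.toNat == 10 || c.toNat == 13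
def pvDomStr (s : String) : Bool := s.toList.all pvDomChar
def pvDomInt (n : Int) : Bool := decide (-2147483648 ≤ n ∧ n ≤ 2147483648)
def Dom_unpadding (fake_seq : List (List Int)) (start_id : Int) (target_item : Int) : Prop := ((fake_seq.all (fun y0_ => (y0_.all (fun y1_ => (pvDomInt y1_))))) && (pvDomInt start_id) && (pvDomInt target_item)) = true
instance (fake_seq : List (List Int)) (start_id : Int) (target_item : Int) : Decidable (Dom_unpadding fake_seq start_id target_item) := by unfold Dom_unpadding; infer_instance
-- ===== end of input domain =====

-- B replaces A's index-based break scan by splitting each row on zeros into chunks and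
-- concatenating chunks while nonempty (alternative decomposition, same cost); proved equal on all inputs.

-- ===== PORT A =====
-- inner 'for i, f in enumerate(fake_data)' loop of A; 'rest' is the suffix of fd from index i.
-- fake_data[i+1] is read only when i ≠ len-1, where it is in range, so getD is exact there.
def unpaddingInner (fd : List Int) (i : Nat) (rest : List Int) (seq : List Int) : List Int :=
  match rest with
  | [] => seq
  | f :: rest' =>
    if f ≠ 0 then unpaddingInner fd (i + 1) rest' (seq ++ [f])
    else if i = fd.length - 1 ∨ fd.getD (i + 1) 0 = 0 then seq
    else unpaddingInner fd (i + 1) rest' seq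

def unpadding (fake_seq : List (List Int)) (start_id : Int) (target_item : Int) : List (List Int) :=
  (fake_seq.foldl (fun (st : List (List Int) × Int) fd =>
      let seq := unpaddingInner fd 0 fd [st.2]
      if seq.length = 1 ∨ seq.length = 2 ∨ ¬ target_item ∈ seq then st
      else (st.1 ++ [seq], st.2 + 1)) ([], start_id)).1

-- ===== PORT B =====
-- Source B's chunk builder: 'chunks.append([])' on a zero, 'chunks[-1].append(x)' otherwise
def splitStep (ch : List (List Int)) (x : Int) : List (List Int) :=
  if x = 0 then ch ++ [[]] else ch.dropLast ++ [ch.getLastD [] ++ [x]]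

-- Source B's 'for c in chunks[1:]: if not c: break; content += c'
def altTakeConcat : List (List Int) → List Int
  | [] => []
  | c :: rest => if c = [] then [] else c ++ altTakeConcat rest

def unpaddingAltGo (ti : Int) : List (List Int) → Int → List (List Int)
  | [], _ => []
  | row :: rest, nid =>
    let chunks := row.foldl splitStep [[]]
    let content := chunks.headD [] ++ altTakeConcat chunks.tail
    if 2 ≤ content.length ∧ (ti = nid ∨ ti ∈ content) then
      (nid :: content) :: unpaddingAltGo ti rest (nid + 1)
    else unpaddingAltGo ti rest nid

def unpadding_alt (fake_seq : List (List Int)) (start_id : Int) (target_item : Int) : List (List Int) :=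
  unpaddingAltGo target_item fake_seq start_id

-- ===== PRECONDITION & SPEC =====
def Spec_unpadding (fake_seq : List (List Int)) (start_id : Int) (target_item : Int) (out : List (List Int)) : Prop := out = unpadding_alt fake_seq start_id target_item
instance (fake_seq : List (List Int)) (start_id : Int) (target_item : Int) (out : List (List Int)) : Decidable (Spec_unpadding fake_seq start_id target_item out) := by unfold Spec_unpadding; infer_instance

-- ===== CLAIM (what is proved, stated in full; the proofs are below) =====
def Claim_equal_unpadding : Prop := ∀ (fake_seq : List (List Int)) (start_id : Int) (target_item : Int), Dom_unpadding fake_seq start_id target_item → Spec_unpadding fake_seq start_id target_item (unpadding fake_seq start_id target_item)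

-- ===== LEMMAS AND PROOFS =====

-- reference value of one row's unpadded content (zeros removed up to A's cut)
def pvRef : List Int → List Int
  | [] => []
  | x :: rest =>
    if x = 0 then (if rest = [] ∨ rest.head?.getD 0 = 0 then [] else pvRef rest)
    else x :: pvRef rest

theorem pvRef_cons (x : Int) (rest : List Int) :
    pvRef (x :: rest) =
      if x = 0 then (if rest = [] ∨ rest.head?.getD 0 = 0 then [] else pvRef rest)
      else x :: pvRef rest := rfl

theorem pv_inner_eq (fd : List Int) (rest : List Int) (i : Nat) (seq : List Int)
    (h : fd.drop i = rest) : unpaddingInner fd i rest seq = seq ++ pvRef rest := by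
  induction rest generalizing i seq with
  | nil => simp [unpaddingInner, pvRef]
  | cons f rest' ih =>
    have hlen : i < fd.length := by
      by_contra hc
      have : fd.drop i = [] := List.drop_eq_nil_of_le (by omega)
      simp [this] at h
    have hdrop' : fd.drop (i + 1) = rest' := by
      rw [← List.drop_drop, h]; rfl
    have hget : fd.getD (i + 1) 0 = rest'.head?.getD 0 := by
      rw [List.getD_eq_getElem?_getD, ← List.head?_drop, hdrop']
    have hnil : rest' = [] ↔ fd.length ≤ i + 1 := by
      rw [← hdrop', List.drop_eq_nil_iff]
    have hlast : (i = fd.length - 1) ↔ rest' = [] := by rw [hnil]; omega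
    simp only [unpaddingInner]
    by_cases hf : f = 0
    · subst hf
      rw [if_neg (by simp)]
      by_cases hc : rest' = [] ∨ rest'.head?.getD 0 = 0
      · rw [if_pos (by rw [hget, hlast]; exact hc), pvRef_cons, if_pos rfl, if_pos hc]
        simp
      · rw [if_neg (by rw [hget, hlast]; exact hc), ih (i + 1) seq hdrop', pvRef_cons,
          if_pos rfl, if_neg hc]
    · rw [if_pos hf, ih (i + 1) (seq ++ [f]) hdrop', pvRef_cons, if_neg hf]
      simp

-- direct-recursion form of Source B's chunk-building fold (current chunk carried separately)
def pvSpl : List Int → List Int → List (List Int)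
  | cur, [] => [cur]
  | cur, x :: xs => if x = 0 then cur :: pvSpl [] xs else pvSpl (cur ++ [x]) xs

theorem pv_foldl_splitStep (xs : List Int) : ∀ (pre : List (List Int)) (cur : List Int),
    xs.foldl splitStep (pre ++ [cur]) = pre ++ pvSpl cur xs := by
  induction xs with
  | nil => intro pre cur; simp [pvSpl]
  | cons x xs ih =>
    intro pre cur
    simp only [List.foldl_cons, splitStep, pvSpl]
    by_cases hx : x = 0
    · rw [if_pos hx, if_pos hx]
      have := ih (pre ++ [cur]) []
      simpa using this
    · rw [if_neg hx, if_neg hx]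
      have h1 : (pre ++ [cur]).dropLast = pre := List.dropLast_concat
      have h2 : (pre ++ [cur]).getLastD [] = cur := by
        simp [List.getLastD_eq_getLast?]
      rw [h1, h2, ih pre (cur ++ [x])]

theorem pvSpl_head_ne (xs : List Int) : ∀ (cur : List Int), cur ≠ [] →
    ∃ h t, pvSpl cur xs = h :: t ∧ h ≠ [] := by
  induction xs with
  | nil => intro cur hc; exact ⟨cur, [], rfl, hc⟩
  | cons x xs ih =>
    intro cur hc
    by_cases hx : x = 0
    · exact ⟨cur, pvSpl [] xs, by simp [pvSpl, hx], hc⟩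
    · obtain ⟨h, t, he, hne⟩ := ih (cur ++ [x]) (by simp)
      exact ⟨h, t, by simp [pvSpl, hx, he], hne⟩

theorem pv_content_eq (xs : List Int) : ∀ (cur : List Int),
    (pvSpl cur xs).headD [] ++ altTakeConcat (pvSpl cur xs).tail = cur ++ pvRef xs := by
  induction xs with
  | nil => intro cur; simp [pvSpl, altTakeConcat, pvRef]
  | cons x xs ih =>
    intro cur
    by_cases hx : x = 0
    · subst hx
      have hsp : pvSpl cur (0 :: xs) = cur :: pvSpl [] xs := by simp [pvSpl]
      rw [hsp, pvRef_cons, if_pos rfl]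
      simp only [List.headD_cons, List.tail_cons]
      cases xs with
      | nil => simp [pvSpl, altTakeConcat]
      | cons y ys =>
        by_cases hy : y = 0
        · rw [if_pos (by simp [hy])]
          have : pvSpl [] (y :: ys) = [] :: pvSpl [] ys := by simp [pvSpl, hy]
          rw [this]
          simp [altTakeConcat]
        · rw [if_neg (by simp [hy])]
          obtain ⟨h, t, he, hne⟩ := pvSpl_head_ne ys [y] (by simp)
          have he2 : pvSpl [] (y :: ys) = h :: t := by
            simpa [pvSpl, hy] using he
          have hih := ih []
          rw [he2] at hih ⊢
          simp only [List.headD_cons, List.tail_cons, List.nil_append] at hih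
          rw [show altTakeConcat (h :: t) = h ++ altTakeConcat t from by
            simp [altTakeConcat, hne]]
          rw [hih]
    · have hsp : pvSpl cur (x :: xs) = pvSpl (cur ++ [x]) xs := by simp [pvSpl, hx]
      rw [hsp, pvRef_cons, if_neg hx, ih (cur ++ [x])]
      simp

theorem pv_row_content (row : List Int) :
    (row.foldl splitStep [[]]).headD [] ++ altTakeConcat (row.foldl splitStep [[]]).tail
      = pvRef row := by
  have h : row.foldl splitStep [[]] = pvSpl [] row := by
    have := pv_foldl_splitStep row [] []
    simpa using this
  rw [h]
  simpa using pv_content_eq row []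

theorem pv_row_eq (fd : List Int) (id : Int) :
    unpaddingInner fd 0 fd [id] = id :: pvRef fd := by
  rw [pv_inner_eq fd fd 0 [id] rfl]; simp

theorem pv_outer_eq (ti : Int) (fs : List (List Int)) (acc : List (List Int)) (id : Int) :
    (fs.foldl (fun (st : List (List Int) × Int) fd =>
      let seq := unpaddingInner fd 0 fd [st.2]
      if seq.length = 1 ∨ seq.length = 2 ∨ ¬ ti ∈ seq then st
      else (st.1 ++ [seq], st.2 + 1)) (acc, id)).1 = acc ++ unpaddingAltGo ti fs id := by
  induction fs generalizing acc id with
  | nil => simp [unpaddingAltGo]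
  | cons fd rest ih =>
    simp only [List.foldl_cons, unpaddingAltGo]
    rw [pv_row_eq fd id, pv_row_content fd]
    set c := pvRef fd with hc
    have hmem : (ti ∈ id :: c) ↔ (ti = id ∨ ti ∈ c) := by simp
    have hcond : ((id :: c).length = 1 ∨ (id :: c).length = 2 ∨ ¬ ti ∈ (id :: c))
        ↔ ¬(2 ≤ c.length ∧ (ti = id ∨ ti ∈ c)) := by
      rw [hmem]
      simp only [List.length_cons]
      constructor
      · rintro (h | h | h) ⟨h2, hm⟩
        · omega
        · omega
        · exact h hm
      · intro h
        by_cases h2 : 2 ≤ c.length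
        · exact Or.inr (Or.inr (fun hm => h ⟨h2, hm⟩))
        · omega
    by_cases hacc : 2 ≤ c.length ∧ (ti = id ∨ ti ∈ c)
    · rw [if_neg (by rw [hcond]; exact not_not_intro hacc), if_pos hacc,
        ih (acc ++ [id :: c]) (id + 1)]
      simp
    · rw [if_pos (hcond.mpr hacc), if_neg hacc]
      exact ih acc id

-- ===== VERDICT (by name: the statement is the Claim_ definition above) =====
theorem unpadding_spec : Claim_equal_unpadding := by
  intro fs sid ti _
  unfold Spec_unpadding unpadding unpadding_alt
  exact pv_outer_eq ti fs [] sid
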